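-- pv_equiv track=rewrite | github.com/Funiusa/CodeTaining | sort_by_extension.py | sort_by_ext
-- ===== SOURCE A (Python) =====
-- def sort_by_ext(files: list[str]) -> list[str]:
--     result, extensions = [], []
--     for file in files:
--         chunk = file.split(".")
--         if chunk[-2] and chunk[-1]:
--             extensions.append(file)
--         else:
--             result.append(file)
--
--     result.sort()
--     extensions.sort()
--     extensions.sort(key=lambda x: x.split(".")[-1])
--     result.extend(extensions)
--     return result
-- ===== SOURCE B (Python) =====
-- def sort_by_ext(files: list[str]) -> list[str]:
--     noext = [f for f in files if not (f.split(".")[-2] and f.split(".")[-1])]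
--     withext = [f for f in files if f.split(".")[-2] and f.split(".")[-1]]
--     out = sorted(noext)
--     for ext in sorted({f.split(".")[-1] for f in withext}):
--         out += sorted(f for f in withext if f.split(".")[-1] == ext)
--     return out
-- ===== Notes on version B (the rewrite author's own statement) =====
-- stated objective: alternative
-- what changed: B replaces A's fold-partition plus double stable sort with two comprehension filters and a group-per-extension pass: it sorts the distinct extensions and, for each, appends the sorted list of files carrying it.
import Mathlib
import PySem

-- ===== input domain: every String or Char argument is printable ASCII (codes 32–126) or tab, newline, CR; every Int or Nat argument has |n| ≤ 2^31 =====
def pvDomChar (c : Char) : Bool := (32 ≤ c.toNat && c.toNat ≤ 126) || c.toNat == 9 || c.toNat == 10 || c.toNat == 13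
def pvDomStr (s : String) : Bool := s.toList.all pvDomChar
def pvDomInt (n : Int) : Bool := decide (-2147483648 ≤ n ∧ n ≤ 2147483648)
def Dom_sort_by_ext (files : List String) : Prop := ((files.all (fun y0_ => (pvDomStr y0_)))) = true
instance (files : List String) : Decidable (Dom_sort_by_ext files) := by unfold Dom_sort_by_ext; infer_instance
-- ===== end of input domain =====

-- B partitions with two comprehension filters and emits sorted groups per sorted distinct
-- extension, instead of A's fold-partition plus double stable sort (alternative decomposition).


-- ===== PORT A =====
-- shared accessor helpers: file.split(".") and x.split(".")[-1] (both Pythons compute these)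
def pvChunks (file : String) : List String := (PySem.Str.split? file ".").getD []
def pvExt (file : String) : String := (PySem.List.pyGet? (pvChunks file) (-1)).getD ""

def sort_by_ext (files : List String) : List String :=
  -- result/extensions partition loop; chunk[-2] with no '.' is an IndexError (excluded by Pre_)
  let rs := files.foldl (fun (acc : List String × List String) file =>
      let chunk := pvChunks file
      let c2 := (PySem.List.pyGet? chunk (-2)).getD ""
      let c1 := (PySem.List.pyGet? chunk (-1)).getD ""
      if c2.toList ≠ [] ∧ c1.toList ≠ [] then (acc.1, acc.2 ++ [file])
      else (acc.1 ++ [file], acc.2)) ([], [])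
  let result := PySem.List.sorted rs.1 (fun x => x)
  let extensions := PySem.List.sorted rs.2 (fun x => x)
  let extensions := PySem.List.sorted extensions (fun x => pvExt x)
  result ++ extensions

-- ===== PORT B =====
-- the comprehension test 'f.split(".")[-2] and f.split(".")[-1]' as a Bool
def pvHasExt (f : String) : Bool :=
  !((PySem.List.pyGet? (pvChunks f) (-2)).getD "").toList.isEmpty &&
  !((PySem.List.pyGet? (pvChunks f) (-1)).getD "").toList.isEmpty

def sort_by_ext_alt (files : List String) : List String :=
  let noext := files.filter (fun f => !pvHasExt f)
  let withext := files.filter (fun f => pvHasExt f)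
  (PySem.List.sorted (PySem.Set.ofList (withext.map pvExt)) (fun x => x)).foldl
    (fun out e => out ++ PySem.List.sorted (withext.filter (fun f => pvExt f == e)) (fun x => x))
    (PySem.List.sorted noext (fun x => x))

-- ===== PRECONDITION & SPEC =====
-- Pre_ excludes exactly the files without a '.': there chunk[-2] raises IndexError in both Pythons.
def Pre_sort_by_ext (files : List String) : Prop := ∀ f ∈ files, PySem.Str.isIn "." f = true
instance (files : List String) : Decidable (Pre_sort_by_ext files) := by unfold Pre_sort_by_ext; infer_instance
def pvWitness_sort_by_ext : List String := ["b.py", "a.txt", "notes.", "a.py"]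
def Spec_sort_by_ext (files : List String) (out : List String) : Prop := out = sort_by_ext_alt files
instance (files : List String) (out : List String) : Decidable (Spec_sort_by_ext files out) := by unfold Spec_sort_by_ext; infer_instance

-- ===== CLAIM (what is proved, stated in full; the proofs are below) =====
def Claim_equal_sort_by_ext : Prop := ∀ (files : List String), Dom_sort_by_ext files → Pre_sort_by_ext files → Spec_sort_by_ext files (sort_by_ext files)

-- ===== LEMMAS AND PROOFS =====

-- the order that characterises both final extension-file lists: by extension, ties by name
def pvR (a b : String) : Prop := pvExt a < pvExt b ∨ (pvExt a = pvExt b ∧ a ≤ b)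

theorem pvR_key_le {a b : String} (h : pvR a b) : pvExt a ≤ pvExt b := by
  rcases h with h | ⟨h, _⟩
  · exact le_of_lt h
  · exact le_of_eq h

-- A's partition loop, characterised as two filters on pvHasExt
theorem pvA_fold (files : List String) (res ex : List String) :
    files.foldl (fun (acc : List String × List String) file =>
      let chunk := pvChunks file
      let c2 := (PySem.List.pyGet? chunk (-2)).getD ""
      let c1 := (PySem.List.pyGet? chunk (-1)).getD ""
      if c2.toList ≠ [] ∧ c1.toList ≠ [] then (acc.1, acc.2 ++ [file])
      else (acc.1 ++ [file], acc.2)) (res, ex)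
    = (res ++ files.filter (fun f => !pvHasExt f), ex ++ files.filter (fun f => pvHasExt f)) := by
  induction files generalizing res ex with
  | nil => simp
  | cons f fs ih =>
    rw [List.foldl_cons]
    by_cases h : ((PySem.List.pyGet? (pvChunks f) (-2)).getD "").toList ≠ [] ∧
                 ((PySem.List.pyGet? (pvChunks f) (-1)).getD "").toList ≠ []
    · have hk : pvHasExt f = true := by
        simp [pvHasExt, h.1, h.2]
      dsimp only
      rw [if_pos h, ih, List.filter_cons, List.filter_cons, hk]
      simp
    · have hk : pvHasExt f = false := by
        simp only [pvHasExt, Bool.and_eq_false_iff, Bool.not_eq_false', List.isEmpty_iff]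
        rw [not_and_or] at h
        rcases h with h | h
        · exact Or.inl (not_not.mp h)
        · exact Or.inr (not_not.mp h)
      dsimp only
      rw [if_neg h, ih, List.filter_cons, List.filter_cons, hk]
      simp

-- stability: inserting a later element into a pvR-sorted accumulator keeps it pvR-sorted
theorem pvInsertBy_pairwise (x : String) (ys : List String)
    (h1 : ys.Pairwise pvR) (h2 : ∀ y ∈ ys, y ≤ x) :
    (PySem.List.insertBy (fun a b => decide (pvExt a < pvExt b)) x ys).Pairwise pvR := by
  induction ys with
  | nil => simp [PySem.List.insertBy]
  | cons y ys ih =>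
    rw [List.pairwise_cons] at h1
    by_cases hlt : pvExt x < pvExt y
    · simp only [PySem.List.insertBy, hlt, decide_true, if_pos]
      refine List.Pairwise.cons ?_ (List.pairwise_cons.mpr h1)
      intro z hz
      rcases List.mem_cons.mp hz with rfl | hz
      · exact Or.inl hlt
      · exact Or.inl (lt_of_lt_of_le hlt (pvR_key_le (h1.1 z hz)))
    · simp only [PySem.List.insertBy, hlt, decide_false, if_neg, Bool.false_eq_true,
        not_false_eq_true]
      refine List.Pairwise.cons ?_ (ih h1.2 (fun z hz => h2 z (List.mem_cons_of_mem y hz)))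
      intro z hz
      rw [PySem.List.mem_insertBy] at hz
      rcases hz with rfl | hz
      · rcases lt_or_eq_of_le (le_of_not_gt hlt) with h | h
        · exact Or.inl h
        · exact Or.inr ⟨h, h2 y List.mem_cons_self⟩
      · exact h1.1 z hz

theorem pvFoldl_insertBy_pairwise (xs acc : List String)
    (hacc : acc.Pairwise pvR) (hcross : ∀ a ∈ acc, ∀ b ∈ xs, a ≤ b)
    (hxs : xs.Pairwise (· ≤ ·)) :
    (xs.foldl (fun acc x => PySem.List.insertBy (fun a b => decide (pvExt a < pvExt b)) x acc) acc).Pairwise pvR := by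
  induction xs generalizing acc with
  | nil => exact hacc
  | cons x xs ih =>
    rw [List.pairwise_cons] at hxs
    refine ih _ (pvInsertBy_pairwise x acc hacc (fun y hy => hcross y hy x List.mem_cons_self)) ?_ hxs.2
    intro a ha b hb
    rw [PySem.List.mem_insertBy] at ha
    rcases ha with rfl | ha
    · exact hxs.1 b hb
    · exact hcross a ha b (List.mem_cons_of_mem x hb)

-- A's doubly sorted extension list is pvR-sorted
theorem pvA_ext_pairwise (E : List String) :
    (PySem.List.sorted (PySem.List.sorted E (fun x => x)) (fun x => pvExt x)).Pairwise pvR := by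
  rw [PySem.List.sorted_eq_foldl_insertBy]
  refine pvFoldl_insertBy_pairwise _ [] (List.Pairwise.nil) (by simp) ?_
  have := PySem.List.sorted_pairwise E (fun x => x)
  simpa using this

-- coverage + nodup key list ⇒ the concatenation of the filter groups is a permutation
theorem pvCover_perm (ks : List String) (E : List String)
    (hnd : ks.Nodup) (hc : ∀ x ∈ E, pvExt x ∈ ks) :
    (ks.flatMap (fun k => E.filter (fun x => pvExt x == k))).Perm E := by
  induction ks generalizing E with
  | nil =>
    cases E with
    | nil => simp
    | cons e E => exact absurd (hc e List.mem_cons_self) (by simp)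
  | cons k ks ih =>
    rw [List.nodup_cons] at hnd
    rw [List.flatMap_cons]
    have hcongr : ks.flatMap (fun k' => E.filter (fun x => pvExt x == k'))
        = ks.flatMap (fun k' => (E.filter (fun x => !(pvExt x == k))).filter (fun x => pvExt x == k')) := by
      apply List.flatMap_congr
      intro k' hk'
      rw [List.filter_filter]
      apply List.filter_congr
      intro x _
      have hkk : k' ≠ k := fun e => hnd.1 (e ▸ hk')
      by_cases h : pvExt x = k'
      · simp [h, hkk]
      · simp [h]
    rw [hcongr]
    have hc' : ∀ x ∈ E.filter (fun x => !(pvExt x == k)), pvExt x ∈ ks := by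
      intro x hx
      rw [List.mem_filter] at hx
      rcases List.mem_cons.mp (hc x hx.1) with h | h
      · exact absurd h (by simpa using hx.2)
      · exact h
    have hperm := ih (E.filter (fun x => !(pvExt x == k))) hnd.2 hc'
    exact (List.Perm.append_left _ hperm).trans (List.filter_append_perm _ E)

-- pointwise permutation of the blocks
theorem pvFlatMap_perm (ks : List String) (f g : String → List String)
    (h : ∀ k ∈ ks, (f k).Perm (g k)) :
    (ks.flatMap f).Perm (ks.flatMap g) := by
  induction ks with
  | nil => simp
  | cons k ks ih =>
    rw [List.flatMap_cons, List.flatMap_cons]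
    exact List.Perm.append (h k List.mem_cons_self)
      (ih (fun k' hk' => h k' (List.mem_cons_of_mem k hk')))

-- the heart: A's double sort equals B's per-key concatenation of sorted groups
theorem pvMain (E : List String) :
    PySem.List.sorted (PySem.List.sorted E (fun x => x)) (fun x => pvExt x)
    = (PySem.List.sorted (PySem.Set.ofList (E.map pvExt)) (fun x => x)).flatMap
        (fun k => PySem.List.sorted (E.filter (fun f => pvExt f == k)) (fun x => x)) := by
  set K := PySem.List.sorted (PySem.Set.ofList (E.map pvExt)) (fun x => x) with hK
  have hKlt : K.Pairwise (· < ·) := PySem.List.sorted_ofList_pairwise_lt _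
  have hKnd : K.Nodup := hKlt.imp (fun h => ne_of_lt h)
  -- RHS is pvR-sorted
  have hrhs : (K.flatMap (fun k => PySem.List.sorted (E.filter (fun f => pvExt f == k)) (fun x => x))).Pairwise pvR := by
    rw [List.pairwise_flatMap]
    constructor
    · intro k _
      have hp := PySem.List.sorted_pairwise (E.filter (fun f => pvExt f == k)) (fun x => x)
      have hmem : ∀ x ∈ PySem.List.sorted (E.filter (fun f => pvExt f == k)) (fun x => x), pvExt x = k := by
        intro x hx
        rw [PySem.List.mem_sorted, List.mem_filter] at hx
        simpa using hx.2
      refine hp.imp_of_mem ?_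
      intro a b ha hb hab
      exact Or.inr ⟨(hmem a ha).trans (hmem b hb).symm, by simpa using hab⟩
    · refine hKlt.imp_of_mem ?_
      intro k1 k2 _ _ h12 x hx y hy
      rw [PySem.List.mem_sorted, List.mem_filter] at hx hy
      have hx2 : pvExt x = k1 := by simpa using hx.2
      have hy2 : pvExt y = k2 := by simpa using hy.2
      exact Or.inl (by rw [hx2, hy2]; exact h12)
  -- both sides are permutations of E
  have hlp : (PySem.List.sorted (PySem.List.sorted E (fun x => x)) (fun x => pvExt x)).Perm E :=
    (PySem.List.sorted_perm _ _ _).trans (PySem.List.sorted_perm _ _ _)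
  have hrp : (K.flatMap (fun k => PySem.List.sorted (E.filter (fun f => pvExt f == k)) (fun x => x))).Perm E := by
    have h1 := pvFlatMap_perm K
      (fun k => PySem.List.sorted (E.filter (fun f => pvExt f == k)) (fun x => x))
      (fun k => E.filter (fun f => pvExt f == k))
      (fun k _ => PySem.List.sorted_perm _ _ _)
    refine h1.trans (pvCover_perm K E hKnd ?_)
    intro x hx
    rw [hK, PySem.List.mem_sorted, PySem.Set.mem_ofList]
    exact List.mem_map_of_mem hx
  -- antisymmetry of pvR gives equality
  refine List.Perm.eq_of_pairwise ?_ (pvA_ext_pairwise E) hrhs (hlp.trans hrp.symm)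
  intro a b _ _ hab hba
  rcases hab with h | ⟨h, hle⟩
  · rcases hba with h' | ⟨h', _⟩
    · exact absurd h' (lt_asymm h)
    · exact absurd h'.symm (ne_of_lt h)
  · rcases hba with h' | ⟨_, hle'⟩
    · exact absurd h.symm (ne_of_lt h')
    · exact le_antisymm hle hle'

-- ===== VERDICT (by name: the statement is the Claim_ definition above) =====
theorem sort_by_ext_spec : Claim_equal_sort_by_ext := by
  intro files _ _
  unfold Spec_sort_by_ext sort_by_ext sort_by_ext_alt
  simp only [pvA_fold files [] [], List.nil_append]
  rw [PySem.List.foldl_append_eq_flatMap]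
  congr 1
  exact pvMain (files.filter (fun f => pvHasExt f))
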